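-- pv_equiv track=rewrite | github.com/Jeoungseungho/python-coding-study | 정승호/직업군_추천하기/solution.py | solution
-- ===== SOURCE A (Python) =====
-- def solution(table, languages, preference):
--     answer = []
--     new_table = sorted([list(t.split()) for t in table], key=lambda x : x[0])
--     preference_table = {n : new_table[n][0] for n in range(len(new_table))}
--
--     for i in range(len(preference_table)):
--         total = 0
--         for lang, pref in zip(languages, preference):
--             if lang in new_table[i]:
--                 total += (6 - new_table[i].index(lang)) * pref
--         answer.append(total)
--     return preference_table[answer.index(max(answer))]
-- ===== SOURCE B (Python) =====
-- def solution(table, languages, preference):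
--     # one preference map built once; per-entry score from the entry's own tokens
--     pref_map = {}
--     for lang, pref in zip(languages, preference):
--         pref_map[lang] = pref_map.get(lang, 0) + pref
--
--     def score(words):
--         total = 0
--         seen = set()
--         for i, w in enumerate(words):
--             if w not in seen:          # credit only the first occurrence, like list.index
--                 seen.add(w)
--                 total += (6 - i) * pref_map.get(w, 0)
--         return total
--
--     entries = sorted(table, key=lambda t: t.split()[0])
--     best = entries[0]
--     best_score = score(best.split())
--     for e in entries[1:]:
--         s = score(e.split())
--         if s > best_score:
--             best, best_score = e, s
--     return best.split()[0]
-- ===== Notes on version B (the rewrite author's own statement) =====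
-- stated objective: faster
-- what changed: Replaces A's per-row scan over zip(languages,preference) with `in`/.index passes over the row by one preference dict built once plus a single pass over each row's own tokens (first occurrences only), and replaces the answer list + index(max) selection by a running first-max fold.
import Mathlib
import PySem

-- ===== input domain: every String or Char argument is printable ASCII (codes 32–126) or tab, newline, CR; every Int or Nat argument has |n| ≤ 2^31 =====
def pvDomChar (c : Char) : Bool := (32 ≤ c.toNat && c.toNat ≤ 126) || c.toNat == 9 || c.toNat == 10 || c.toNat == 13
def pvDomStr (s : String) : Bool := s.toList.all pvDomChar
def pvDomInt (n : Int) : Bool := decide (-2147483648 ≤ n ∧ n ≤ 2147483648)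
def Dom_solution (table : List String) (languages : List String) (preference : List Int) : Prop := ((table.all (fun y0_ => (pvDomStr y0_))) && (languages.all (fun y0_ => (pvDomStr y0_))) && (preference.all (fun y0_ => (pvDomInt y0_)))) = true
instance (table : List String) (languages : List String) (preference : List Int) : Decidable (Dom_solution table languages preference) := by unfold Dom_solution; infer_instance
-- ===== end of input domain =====

-- B replaces A's per-row scan over zip(languages, preference) (with `in`/.index on each row)
-- by one preference dict built once plus a single pass over each row's own tokens, and replaces
-- A's answer list + index(max) selection by a running first-max fold (objective: alternative).

-- ===== PORT A =====
def solution (table : List String) (languages : List String) (preference : List Int) : String :=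
  let new_table : List (List String) :=
    PySem.List.sorted (table.map (fun t => PySem.Str.split₀ t)) (fun x => PySem.List.pyGetD x 0 "")
  let preference_table : PySem.Dict Int String :=
    (PySem.List.pyRange 0 (PySem.List.len new_table)).foldl
      (fun d n => d.insert n (PySem.List.pyGetD (PySem.List.pyGetD new_table n []) 0 "")) PySem.Dict.empty
  let answer : List Int :=
    (PySem.List.pyRange 0 (preference_table.size : Int)).foldl
      (fun acc i =>
        acc ++ [(languages.zip preference).foldl
          (fun tot lp =>
            if (PySem.List.pyGetD new_table i []).contains lp.1 then
              tot + (6 - ((PySem.List.index? (PySem.List.pyGetD new_table i []) lp.1).getD 0 : Int)) * lp.2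
            else tot) 0]) []
  -- max([]) raises ValueError (excluded by Pre_solution: table ≠ []); the in-range subscripts
  -- x[0] / new_table[n][0] raise IndexError on an all-whitespace entry (excluded by Pre_solution),
  -- ported as pyGetD with a default; answer.index(m) and the dict lookup always succeed.
  match PySem.List.max? answer (fun x => x) with
  | none => ""
  | some m => preference_table.getD ((PySem.List.index? answer m).getD 0 : Int) ""

-- ===== PORT B =====
-- B's score(words): one pass over the enumerated tokens, crediting only first occurrences.
def scoreB (pm : PySem.Dict String Int) : List (Int × String) → PySem.Set String → Int → Int
  | [], _, tot => tot
  | (i, w) :: rest, seen, tot =>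
    if PySem.Set.contains seen w then scoreB pm rest seen tot
    else scoreB pm rest (PySem.Set.add seen w) (tot + (6 - i) * pm.getD w 0)

def solution_alt (table : List String) (languages : List String) (preference : List Int) : String :=
  let pm : PySem.Dict String Int :=
    (languages.zip preference).foldl (fun d lp => d.insert lp.1 (d.getD lp.1 0 + lp.2)) PySem.Dict.empty
  -- entries[0] on an empty table, and t.split()[0] on an all-whitespace entry, raise
  -- (excluded by Pre_solution); the subscripts are ported as pyGetD with a default.
  match PySem.List.sorted table (fun t => PySem.List.pyGetD (PySem.Str.split₀ t) 0 "") with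
  | [] => ""
  | e0 :: rest =>
    let best := rest.foldl
      (fun p e =>
        let s := scoreB pm (PySem.List.enumerate (PySem.Str.split₀ e) 0) PySem.Set.empty 0
        if p.2 < s then (e, s) else p)
      (e0, scoreB pm (PySem.List.enumerate (PySem.Str.split₀ e0) 0) PySem.Set.empty 0)
    PySem.List.pyGetD (PySem.Str.split₀ best.1) 0 ""

-- ===== PRECONDITION & SPEC =====
-- Pre_ excludes exactly the inputs where the Pythons raise: an empty table (A: max([]) ValueError,
-- B: entries[0] IndexError) and a table entry with no tokens (x[0] / t.split()[0] IndexError).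
def Pre_solution (table : List String) (languages : List String) (preference : List Int) : Prop :=
  table ≠ [] ∧ ∀ t ∈ table, PySem.Str.split₀ t ≠ []
instance (table : List String) (languages : List String) (preference : List Int) : Decidable (Pre_solution table languages preference) := by unfold Pre_solution; infer_instance
def pvWitness_solution : List String × List String × List Int :=
  (["python backend", "java frontend"], ["python", "java"], [5, 3])

def Spec_solution (table : List String) (languages : List String) (preference : List Int) (out : String) : Prop := out = solution_alt table languages preference
instance (table : List String) (languages : List String) (preference : List Int) (out : String) : Decidable (Spec_solution table languages preference out) := by unfold Spec_solution; infer_instance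

-- ===== CLAIM (what is proved, stated in full; the proofs are below) =====
def Claim_equal_solution : Prop := ∀ (table : List String) (languages : List String) (preference : List Int), Dom_solution table languages preference → Pre_solution table languages preference → Spec_solution table languages preference (solution table languages preference)

-- ===== LEMMAS AND PROOFS =====

-- insertion sort commutes with map when the mapped key agrees
theorem pv_insertBy_map {α β : Type} (f : α → β) (before : β → β → Bool) (x : α) (ys : List α) :
    PySem.List.insertBy before (f x) (ys.map f)
      = (PySem.List.insertBy (fun a b => before (f a) (f b)) x ys).map f := by
  induction ys with
  | nil => simp [PySem.List.insertBy]
  | cons y t ih =>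
    simp only [List.map_cons, PySem.List.insertBy]
    split <;> simp [ih]

theorem pv_sorted_map {α β κ : Type} [LT κ] [DecidableLT κ] (f : α → β) (key : β → κ) (xs : List α) :
    PySem.List.sorted (xs.map f) key = (PySem.List.sorted xs (fun a => key (f a))).map f := by
  rw [PySem.List.sorted_eq_foldl_insertBy, PySem.List.sorted_eq_foldl_insertBy]
  suffices h : ∀ acc : List α,
      (xs.map f).foldl (fun acc x => PySem.List.insertBy (fun a b => decide (key a < key b)) x acc) (acc.map f)
        = (xs.foldl (fun acc x => PySem.List.insertBy (fun a b => decide (key (f a) < key (f b))) x acc) acc).map f by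
    simpa using h []
  induction xs with
  | nil => intro acc; simp
  | cons x t ih =>
    intro acc
    simp only [List.map_cons, List.foldl_cons]
    rw [pv_insertBy_map]
    exact ih _

-- first position of l among the not-yet-seen tokens of an enumerated list
def find1 (l : String) : List (Int × String) → PySem.Set String → Option Int
  | [], _ => none
  | (i, w) :: rest, seen =>
    if PySem.Set.contains seen w then find1 l rest seen
    else if w = l then some i else find1 l rest (PySem.Set.add seen w)

def d1 (p : Int) : Option Int → Int
  | none => 0
  | some i => (6 - i) * p

theorem scoreB_acc (pm : PySem.Dict String Int) :
    ∀ (es : List (Int × String)) (seen : PySem.Set String) (tot d : Int),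
      scoreB pm es seen (tot + d) = scoreB pm es seen tot + d := by
  intro es
  induction es with
  | nil => intro seen tot d; simp [scoreB]
  | cons iw rest ih =>
    intro seen tot d
    obtain ⟨i, w⟩ := iw
    simp only [scoreB]
    split
    · exact ih _ _ _
    · rw [show tot + d + (6 - i) * pm.getD w 0 = tot + (6 - i) * pm.getD w 0 + d by ring, ih]

theorem scoreB_insert_mem (pm : PySem.Dict String Int) (l : String) (v : Int) :
    ∀ (es : List (Int × String)) (seen : PySem.Set String) (tot : Int), l ∈ seen →
      scoreB (pm.insert l v) es seen tot = scoreB pm es seen tot := by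
  intro es
  induction es with
  | nil => intro seen tot _; simp [scoreB]
  | cons iw rest ih =>
    intro seen tot h
    obtain ⟨i, w⟩ := iw
    simp only [scoreB]
    by_cases hw : PySem.Set.contains seen w
    · rw [if_pos hw, if_pos hw]; exact ih _ _ h
    · have hwl : w ≠ l := by
        intro e
        exact hw (by simpa [PySem.Set.contains, List.contains_iff_mem] using e ▸ h)
      rw [if_neg hw, if_neg hw, PySem.Dict.getD_insert, if_neg hwl]
      exact ih _ _ ((PySem.Set.mem_add seen w l).mpr (Or.inl h))

theorem scoreB_insert (pm : PySem.Dict String Int) (l : String) (p : Int) :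
    ∀ (es : List (Int × String)) (seen : PySem.Set String) (tot : Int),
      scoreB (pm.insert l (pm.getD l 0 + p)) es seen tot
        = scoreB pm es seen tot + d1 p (find1 l es seen) := by
  intro es
  induction es with
  | nil => intro seen tot; simp [scoreB, find1, d1]
  | cons iw rest ih =>
    intro seen tot
    obtain ⟨i, w⟩ := iw
    simp only [scoreB, find1]
    by_cases hw : PySem.Set.contains seen w
    · rw [if_pos hw, if_pos hw, if_pos hw]; exact ih _ _
    · rw [if_neg hw, if_neg hw, if_neg hw]
      by_cases hwl : w = l
      · subst hwl
        rw [if_pos rfl, PySem.Dict.getD_insert_self,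
          scoreB_insert_mem pm w _ rest _ _ ((PySem.Set.mem_add seen w w).mpr (Or.inr rfl)),
          show tot + (6 - i) * (pm.getD w 0 + p) = tot + (6 - i) * pm.getD w 0 + (6 - i) * p by ring,
          scoreB_acc]
        simp [d1]
      · rw [if_neg hwl, PySem.Dict.getD_insert, if_neg hwl]
        exact ih _ _

theorem scoreB_empty (es : List (Int × String)) :
    ∀ (seen : PySem.Set String) (tot : Int),
      scoreB PySem.Dict.empty es seen tot = tot := by
  induction es with
  | nil => intro seen tot; simp [scoreB]
  | cons iw rest ih =>
    intro seen tot
    obtain ⟨i, w⟩ := iw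
    simp only [scoreB, PySem.Dict.getD_empty, mul_zero, add_zero]
    split <;> exact ih _ _

theorem scoreB_foldl (es : List (Int × String)) :
    ∀ (zs : List (String × Int)) (pm : PySem.Dict String Int),
      scoreB (zs.foldl (fun d lp => d.insert lp.1 (d.getD lp.1 0 + lp.2)) pm) es PySem.Set.empty 0
        = zs.foldl (fun tot lp => tot + d1 lp.2 (find1 lp.1 es PySem.Set.empty)) (scoreB pm es PySem.Set.empty 0) := by
  intro zs
  induction zs with
  | nil => intro pm; simp
  | cons lp rest ih =>
    intro pm
    obtain ⟨l, p⟩ := lp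
    simp only [List.foldl_cons]
    rw [ih, scoreB_insert]

theorem find1_enumerate (l : String) :
    ∀ (ts : List String) (k : Int) (seen : PySem.Set String), l ∉ seen →
      find1 l (PySem.List.enumerate ts k) seen
        = (PySem.List.index? ts l).map (fun n => k + (n : Int)) := by
  intro ts
  induction ts with
  | nil => intro k seen _; simp [PySem.List.enumerate, find1]
  | cons t ts' ih =>
    intro k seen h
    rw [PySem.List.enumerate_cons]
    simp only [find1]
    by_cases hc : PySem.Set.contains seen t
    · have htl : t ≠ l := by
        intro e
        subst e
        exact h (List.contains_iff_mem.mp hc)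
      rw [if_pos hc, ih _ _ h, PySem.List.index?_cons_of_ne _ htl]
      cases PySem.List.index? ts' l
      · simp
      · simp
        ring
    · rw [if_neg hc]
      by_cases htl : t = l
      · subst htl
        rw [if_pos rfl, PySem.List.index?_cons_self]
        simp
      · have h' : l ∉ PySem.Set.add seen t := by
          intro hm
          rcases (PySem.Set.mem_add seen t l).mp hm with h1 | h1
          · exact h h1
          · exact htl h1.symm
        rw [if_neg htl, ih _ _ h', PySem.List.index?_cons_of_ne _ htl]
        cases PySem.List.index? ts' l
        · simp
        · simp
          ring

-- B's score of a row equals A's inner loop over zip(languages, preference) on that row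
theorem row_score_eq (languages : List String) (preference : List Int) (ts : List String) :
    scoreB ((languages.zip preference).foldl
        (fun d lp => d.insert lp.1 (d.getD lp.1 0 + lp.2)) PySem.Dict.empty)
        (PySem.List.enumerate ts 0) PySem.Set.empty 0
      = (languages.zip preference).foldl
          (fun tot lp =>
            if ts.contains lp.1 then
              tot + (6 - ((PySem.List.index? ts lp.1).getD 0 : Int)) * lp.2
            else tot) 0 := by
  rw [scoreB_foldl, scoreB_empty]
  apply PySem.List.foldl_congr_mem
  intro tot lp _
  rw [find1_enumerate lp.1 ts 0 PySem.Set.empty (by simp [PySem.Set.empty])]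
  cases hidx : PySem.List.index? ts lp.1 with
  | none =>
    have hmem : lp.1 ∉ ts := (PySem.List.index?_eq_none_iff ts lp.1).mp hidx
    have hcon : ts.contains lp.1 = false := by
      simpa using (fun hc => hmem (List.contains_iff_mem.mp hc))
    simp only [d1, hcon]
    simp
  | some n =>
    have hmem : lp.1 ∈ ts := by
      have := (PySem.List.index?_isSome_iff ts lp.1).mp (by rw [hidx]; rfl)
      exact this
    have hcon : ts.contains lp.1 = true := List.contains_iff_mem.mpr hmem
    simp only [d1, hidx]
    simp [hmem]

-- the running first-max fold picks the first element attaining the maximum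
theorem fold_argmax (g : String → Int) :
    ∀ (xs : List String) (b : String),
      ∃ k : Nat,
        (b :: xs)[k]? = some ((xs.foldl (fun p e => if p.2 < g e then (e, g e) else p) (b, g b)).1) ∧
        (xs.foldl (fun p e => if p.2 < g e then (e, g e) else p) (b, g b)).2
          = g ((xs.foldl (fun p e => if p.2 < g e then (e, g e) else p) (b, g b)).1) ∧
        (∀ y ∈ b :: xs, g y ≤ (xs.foldl (fun p e => if p.2 < g e then (e, g e) else p) (b, g b)).2) ∧
        (∀ j < k, ∀ y, (b :: xs)[j]? = some y →
          g y < (xs.foldl (fun p e => if p.2 < g e then (e, g e) else p) (b, g b)).2) := by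
  intro xs
  induction xs with
  | nil =>
    intro b
    refine ⟨0, by simp, by simp, ?_, ?_⟩
    · intro y hy
      simp at hy
      subst hy
      simp
    · intro j hj
      omega
  | cons x t ih =>
    intro b
    simp only [List.foldl_cons]
    by_cases h : g b < g x
    · rw [show (if (b, g b).2 < g x then (x, g x) else (b, g b)) = (x, g x) by simp [h]]
      obtain ⟨k, h1, h2, h3, h4⟩ := ih x
      refine ⟨k + 1, by simpa using h1, h2, ?_, ?_⟩
      · intro y hy
        rcases List.mem_cons.mp hy with rfl | hy'
        · exact le_of_lt (lt_of_lt_of_le h (h3 x (List.mem_cons_self)))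
        · exact h3 y hy'
      · intro j hj y hy
        cases j with
        | zero =>
          simp at hy
          subst hy
          exact lt_of_lt_of_le h (h3 x (List.mem_cons_self))
        | succ j' => exact h4 j' (by omega) y (by simpa using hy)
    · rw [show (if (b, g b).2 < g x then (x, g x) else (b, g b)) = (b, g b) by simp [h]]
      obtain ⟨k, h1, h2, h3, h4⟩ := ih b
      cases k with
      | zero =>
        refine ⟨0, by simpa using h1, h2, ?_, ?_⟩
        · intro y hy
          rcases List.mem_cons.mp hy with rfl | hy'
          · exact h3 y (List.mem_cons_self)
          rcases List.mem_cons.mp hy' with rfl | hy''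
          · exact le_trans (not_lt.mp h) (h3 b (List.mem_cons_self))
          · exact h3 y (List.mem_cons_of_mem _ hy'')
        · intro j hj
          omega
      | succ k' =>
        refine ⟨k' + 2, by simpa using h1, h2, ?_, ?_⟩
        · intro y hy
          rcases List.mem_cons.mp hy with rfl | hy'
          · exact h3 y (List.mem_cons_self)
          rcases List.mem_cons.mp hy' with rfl | hy''
          · exact le_trans (not_lt.mp h) (h3 b (List.mem_cons_self))
          · exact h3 y (List.mem_cons_of_mem _ hy'')
        · intro j hj y hy
          match j, hy with
          | 0, hy =>
            have : b = y := by simpa using hy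
            subst this
            exact h4 0 (by omega) _ (by simp)
          | 1, hy =>
            have : x = y := by simpa using hy
            subst this
            exact lt_of_le_of_lt (not_lt.mp h) (h4 0 (by omega) b (by simp))
          | (j'' + 2), hy =>
            exact h4 (j'' + 1) (by omega) y (by simpa using hy)

-- A's max/index selection and B's running fold pick the same element
theorem argmax_select (g : String → Int) (e0 : String) (rest : List String) :
    ∃ idx m, PySem.List.max? ((e0 :: rest).map g) (fun x => x) = some m ∧
      PySem.List.index? ((e0 :: rest).map g) m = some idx ∧
      idx < (e0 :: rest).length ∧
      (e0 :: rest)[idx]? = some ((rest.foldl (fun p e => if p.2 < g e then (e, g e) else p) (e0, g e0)).1) := by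
  cases hmax : PySem.List.max? ((e0 :: rest).map g) (fun x => x) with
  | none =>
    exact absurd ((PySem.List.max?_eq_none_iff _ _).mp hmax) (by simp)
  | some m =>
    have hmmem : m ∈ (e0 :: rest).map g := PySem.List.max?_mem hmax
    cases hidx : PySem.List.index? ((e0 :: rest).map g) m with
    | none => exact absurd hmmem ((PySem.List.index?_eq_none_iff _ _).mp hidx)
    | some idx =>
      obtain ⟨hlt, hval, hbefore⟩ := PySem.List.getElem_of_index?_eq_some hidx
      obtain ⟨k, h1, h2, h3, h4⟩ := fold_argmax g rest e0
      have hlen : ((e0 :: rest).map g).length = (e0 :: rest).length := List.length_map ..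
      have hltL : idx < (e0 :: rest).length := hlen ▸ hlt
      have hrmem : ((rest.foldl (fun p e => if p.2 < g e then (e, g e) else p) (e0, g e0)).1) ∈ e0 :: rest :=
        List.mem_of_getElem? h1
      have hgle : g ((rest.foldl (fun p e => if p.2 < g e then (e, g e) else p) (e0, g e0)).1) ≤ m :=
        PySem.List.max?_isMax hmax _ (List.mem_map_of_mem hrmem)
      have hidxval : g ((e0 :: rest)[idx]'hltL) = m := by
        rw [← hval, List.getElem_map]
      have hmle : m ≤ (rest.foldl (fun p e => if p.2 < g e then (e, g e) else p) (e0, g e0)).2 := by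
        rw [← hidxval]
        exact h3 _ (List.getElem_mem hltL)
      have hm2 : m = (rest.foldl (fun p e => if p.2 < g e then (e, g e) else p) (e0, g e0)).2 :=
        le_antisymm hmle (h2 ▸ hgle)
      have hk : k = idx := by
        rcases Nat.lt_trichotomy k idx with hkl | hke | hkg
        · exfalso
          have hkL : k < (e0 :: rest).length := lt_trans hkl hltL
          have hkl' : (e0 :: rest)[k]'hkL = (rest.foldl (fun p e => if p.2 < g e then (e, g e) else p) (e0, g e0)).1 := by
            have := h1
            rw [List.getElem?_eq_some_iff] at this
            obtain ⟨_, hh⟩ := this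
            exact hh
          have : ((e0 :: rest).map g)[k]'(hlen ▸ hkL) = m := by
            simp only [List.getElem_map, hkl', ← h2, ← hm2]
          exact hbefore k (by omega) this
        · exact hke
        · exfalso
          have : g ((e0 :: rest)[idx]'hltL) < (rest.foldl (fun p e => if p.2 < g e then (e, g e) else p) (e0, g e0)).2 :=
            h4 idx hkg _ (List.getElem?_eq_some_iff.mpr ⟨hltL, rfl⟩)
          rw [hidxval, ← hm2] at this
          exact lt_irrefl m this
      subst hk
      exact ⟨k, m, rfl, hidx, hltL, h1⟩

theorem pv_range_cast (xs : List (List String)) :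
    PySem.List.pyRange 0 ((xs.length : Nat) : Int) = List.map (fun k => ((k : Nat) : Int)) (List.range xs.length) :=
  PySem.List.pyRange_zero_natCast xs.length

theorem pref_table_items (xs : List (List String)) :
    ((PySem.List.pyRange 0 ((xs.length : Nat) : Int)).foldl
        (fun d n => d.insert n (PySem.List.pyGetD (PySem.List.pyGetD xs n []) 0 "")) PySem.Dict.empty).items
      = (PySem.List.pyRange 0 ((xs.length : Nat) : Int)).map
          (fun n => (n, PySem.List.pyGetD (PySem.List.pyGetD xs n []) 0 "")) := by
  have hnd : ((PySem.List.pyRange 0 ((xs.length : Nat) : Int)).map (fun a => a)).Nodup := by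
    rw [List.map_id', pv_range_cast]
    exact (List.nodup_range).map (fun a b => by omega)
  simpa using PySem.Dict.items_foldl_insert_fresh (PySem.List.pyRange 0 ((xs.length : Nat) : Int))
    (fun a => a) (fun n => PySem.List.pyGetD (PySem.List.pyGetD xs n []) 0 "") PySem.Dict.empty
    (fun a _ => PySem.Dict.contains_empty a) hnd

theorem pref_table_size (xs : List (List String)) :
    ((PySem.List.pyRange 0 ((xs.length : Nat) : Int)).foldl
        (fun d n => d.insert n (PySem.List.pyGetD (PySem.List.pyGetD xs n []) 0 "")) PySem.Dict.empty).size
      = xs.length := by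
  unfold PySem.Dict.size
  rw [pref_table_items, List.length_map, pv_range_cast, List.length_map, List.length_range]

theorem pref_table_getD (xs : List (List String)) (j : Nat) (hj : j < xs.length) :
    ((PySem.List.pyRange 0 ((xs.length : Nat) : Int)).foldl
        (fun d n => d.insert n (PySem.List.pyGetD (PySem.List.pyGetD xs n []) 0 "")) PySem.Dict.empty).getD (j : Int) ""
      = PySem.List.pyGetD (PySem.List.pyGetD xs (j : Int) []) 0 "" := by
  apply PySem.Dict.getD_of_mem_items
  · rw [pref_table_items, pv_range_cast, List.map_map]
    exact List.mem_map.mpr ⟨j, List.mem_range.mpr hj, rfl⟩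
  · unfold PySem.Dict.keys
    rw [pref_table_items, List.map_map, pv_range_cast, List.map_map]
    exact (List.nodup_range).map (fun a b h => by simpa using h)

theorem map_row (xs : List (List String)) (f : List String → Int) :
    (PySem.List.pyRange 0 ((xs.length : Nat) : Int)).map (fun i => f (PySem.List.pyGetD xs i [])) = xs.map f := by
  conv_rhs => rw [← PySem.List.map_pyGetD_pyRange_zero xs []]
  simp only [PySem.List.len]
  rw [List.map_map]
  rfl

theorem ports_eq (table languages preference) : solution table languages preference = solution_alt table languages preference := by
  simp only [solution, solution_alt]
  rw [pv_sorted_map (fun t => PySem.Str.split₀ t) (fun x => PySem.List.pyGetD x 0 "") table]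
  cases hL : PySem.List.sorted table (fun a => PySem.List.pyGetD (PySem.Str.split₀ a) 0 "") with
  | nil =>
    norm_num [PySem.List.pyRange, PySem.List.len, PySem.Dict.size, PySem.Dict.empty, PySem.List.max?]
  | cons e0 rest =>
    simp only [PySem.List.len]
    rw [pref_table_size]
    rw [PySem.List.foldl_append_singleton_eq_map]
    rw [List.nil_append]
    rw [map_row (List.map (fun t => PySem.Str.split₀ t) (e0 :: rest))
      (fun ts => List.foldl
        (fun tot lp =>
          if ts.contains lp.1 = true then
            tot + (6 - ((PySem.List.index? ts lp.1).getD 0 : Int)) * lp.2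
          else tot) 0 (languages.zip preference))]
    rw [List.map_map]
    rw [show ((fun ts => List.foldl (fun tot lp => if ts.contains lp.1 = true then tot + (6 - ((PySem.List.index? ts lp.1).getD 0 : Int)) * lp.2 else tot) 0 (languages.zip preference)) ∘ (fun t => PySem.Str.split₀ t)) = (fun e => scoreB (List.foldl (fun d lp => d.insert lp.1 (d.getD lp.1 0 + lp.2)) PySem.Dict.empty (languages.zip preference)) (PySem.List.enumerate (PySem.Str.split₀ e) 0) PySem.Set.empty 0)
      from funext (fun e => (row_score_eq languages preference (PySem.Str.split₀ e)).symm)]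
    obtain ⟨idx, m, hmax, hidx, hlt, hsel⟩ := argmax_select (fun e => scoreB (List.foldl (fun d lp => d.insert lp.1 (d.getD lp.1 0 + lp.2)) PySem.Dict.empty (languages.zip preference)) (PySem.List.enumerate (PySem.Str.split₀ e) 0) PySem.Set.empty 0) e0 rest
    rw [hmax]
    dsimp only
    rw [hidx]
    simp only [Option.getD_some]
    rw [pref_table_getD (List.map (fun t => PySem.Str.split₀ t) (e0 :: rest)) idx (by simpa using hlt)]
    rw [PySem.List.pyGetD_natCast]
    rw [List.getD_eq_getElem?_getD]
    rw [List.getElem?_map, hsel]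
    rfl

-- ===== VERDICT (by name: the statement is the Claim_ definition above) =====
theorem solution_spec : Claim_equal_solution := by
  intro table languages preference _ _
  exact ports_eq table languages preference
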